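-- pv_equiv track=rewrite | github.com/skyecrocker/Computational_Epistemology | epistemic_landscapes/Social_Network.py | makeIsolatedGraph
-- ===== SOURCE A (Python) =====
-- def makeIsolatedGraph(numAgents):
--     m = []
--     for i in range(numAgents):
--         m.append([])
--         for j in range(numAgents):
--             if i == j:
--                 m[i].append(1)
--             else:
--                 m[i].append(0)
--     return m
-- ===== SOURCE B (Python) =====
-- def makeIsolatedGraph(numAgents):
--     flat = ([1] + [0] * numAgents) * numAgents
--     return [flat[i * numAgents:(i + 1) * numAgents] for i in range(numAgents)]
-- ===== Notes on version B (the rewrite author's own statement) =====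
-- stated objective: alternative
-- what changed: Instead of filling the matrix cell by cell with an i==j branch, B tiles one flat buffer (a one followed by a row of zeros, repeated) and slices it into consecutive rows, which lands each diagonal one in place automatically.
import Mathlib
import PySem

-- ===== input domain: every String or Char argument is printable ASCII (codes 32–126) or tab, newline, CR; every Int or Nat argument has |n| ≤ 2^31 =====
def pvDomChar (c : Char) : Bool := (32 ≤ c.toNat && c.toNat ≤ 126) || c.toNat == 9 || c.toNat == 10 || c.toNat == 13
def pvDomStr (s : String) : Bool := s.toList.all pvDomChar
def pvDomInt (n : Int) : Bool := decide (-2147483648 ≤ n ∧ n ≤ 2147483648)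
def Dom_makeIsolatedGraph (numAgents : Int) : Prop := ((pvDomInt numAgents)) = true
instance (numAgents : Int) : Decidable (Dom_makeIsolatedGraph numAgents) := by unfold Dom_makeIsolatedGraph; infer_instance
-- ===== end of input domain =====

-- ===== PORT A =====
-- B tiles one flat buffer (a one followed by a row of zeros, repeated) and slices it into
-- consecutive rows, instead of A's cell-by-cell construction with a diagonal branch; objective: alternative.
def makeIsolatedGraph (numAgents : Int) : List (List Int) :=
  (PySem.List.pyRange 0 numAgents 1).foldl
    (fun m i =>
      m ++ [(PySem.List.pyRange 0 numAgents 1).foldl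
        (fun row j => row ++ [if i == j then (1 : Int) else 0]) []])
    []

-- ===== PORT B =====
def makeIsolatedGraph_alt (numAgents : Int) : List (List Int) :=
  let flat := (List.replicate numAgents.toNat ((1 : Int) :: List.replicate numAgents.toNat 0)).flatten
  (PySem.List.pyRange 0 numAgents 1).map
    (fun i => PySem.List.slice flat (some (i * numAgents)) (some ((i + 1) * numAgents)))

-- ===== PRECONDITION & SPEC =====
def Spec_makeIsolatedGraph (numAgents : Int) (out : List (List Int)) : Prop := out = makeIsolatedGraph_alt numAgents
instance (numAgents : Int) (out : List (List Int)) : Decidable (Spec_makeIsolatedGraph numAgents out) := by unfold Spec_makeIsolatedGraph; infer_instance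

-- ===== CLAIM (what is proved, stated in full; the proofs are below) =====
def Claim_equal_makeIsolatedGraph : Prop := ∀ (numAgents : Int), Dom_makeIsolatedGraph numAgents → Spec_makeIsolatedGraph numAgents (makeIsolatedGraph numAgents)

-- ===== LEMMAS AND PROOFS =====

-- common closed form: the n×n identity matrix
def pvIdent (n : Nat) : List (List Int) :=
  (List.range n).map (fun i => (List.replicate n (0 : Int)).set i 1)

-- A's inner loop over range(n) builds exactly replicate-n-zeros with a 1 at index i.
theorem rowA_eq (n : Int) (i : Int) (hi0 : 0 ≤ i) (_hin : i < n) :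
    (PySem.List.pyRange 0 n 1).foldl (fun row j => row ++ [if i == j then (1 : Int) else 0]) []
      = (List.replicate n.toNat (0 : Int)).set i.toNat 1 := by
  rw [PySem.List.foldl_append_eq_flatMap, PySem.List.pyRange_one]
  have hsing : ∀ (l : List Int),
      l.flatMap (fun j => [if i == j then (1 : Int) else 0])
        = l.map (fun j => if i == j then (1 : Int) else 0) := by
    intro l; induction l with
    | nil => rfl
    | cons x xs ih => simpa [List.flatMap_cons] using ih
  rw [hsing]
  apply List.ext_getElem
  · simp
  · intro k hk hk'
    have hkn : k < n.toNat := by simpa using hk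
    simp only [List.nil_append, List.getElem_map, List.getElem_range, zero_add,
      List.getElem_set, List.getElem_replicate]
    by_cases h : i.toNat = k
    · have : i = (k : Int) := by omega
      simp [this]
    · have : i ≠ (k : Int) := by omega
      simp [h, this]

-- A's outer loop = the identity matrix in closed form.
theorem portA_eq (n : Int) : makeIsolatedGraph n = pvIdent n.toNat := by
  unfold makeIsolatedGraph pvIdent
  rw [PySem.List.foldl_append_eq_flatMap]
  have : ∀ (l : List Int), (∀ i ∈ l, 0 ≤ i ∧ i < n) →
      l.flatMap (fun i =>
        [(PySem.List.pyRange 0 n 1).foldl (fun row j => row ++ [if i == j then (1 : Int) else 0]) []])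
        = l.map (fun i => (List.replicate n.toNat (0 : Int)).set i.toNat 1) := by
    intro l hl; induction l with
    | nil => rfl
    | cons x xs ih =>
      have hx := hl x (by simp)
      rw [List.flatMap_cons, rowA_eq n x hx.1 hx.2, ih (fun i hi => hl i (by simp [hi]))]
      rfl
  rw [this _ (fun i hi => (PySem.List.mem_pyRange_one.mp hi))]
  rw [PySem.List.pyRange_one]
  apply List.ext_getElem
  · simp
  · intro k hk hk'
    have hkn : k < n.toNat := by simpa using hk
    simp

-- length of m concatenated copies of the (N+1)-element tile
theorem lenTile (N m : Nat) :
    ((List.replicate m ((1 : Int) :: List.replicate N 0)).flatten).length = m * (N + 1) := by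
  simp

-- the last k elements of k concatenated tiles are zeros
theorem dropTiles (N k : Nat) (hk : k ≤ N) :
    ((List.replicate k ((1 : Int) :: List.replicate N 0)).flatten).drop (k * N)
      = List.replicate k 0 := by
  cases k with
  | zero => simp
  | succ m =>
    have hm : m < N := hk
    have e1 : m * (N + 1) = m * N + m := by ring
    have e2 : (m + 1) * N = m * N + N := by ring
    rw [List.replicate_succ', List.flatten_append, List.flatten_cons, List.flatten_nil,
      List.append_nil, List.drop_append]
    rw [List.drop_eq_nil_of_le (by rw [lenTile]; omega), lenTile]
    have h1 : (m + 1) * N - m * (N + 1) = (N - m - 1) + 1 := by omega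
    rw [h1, List.drop_succ_cons, List.drop_replicate]
    have h2 : N - (N - m - 1) = m + 1 := by omega
    rw [h2, List.nil_append]

-- row k of the tiled flat buffer is the k-th standard basis row
theorem rowB (N k : Nat) (hk : k < N) :
    (((List.replicate N ((1 : Int) :: List.replicate N 0)).flatten).drop (k * N)).take N
      = (List.replicate N (0 : Int)).set k 1 := by
  have e1 : k * (N + 1) = k * N + k := by ring
  have hsplit : List.replicate N ((1 : Int) :: List.replicate N 0)
      = List.replicate k ((1 : Int) :: List.replicate N 0)
        ++ List.replicate (N - k) ((1 : Int) :: List.replicate N 0) := by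
    rw [← List.replicate_add]; congr 1; omega
  rw [hsplit, List.flatten_append, List.drop_append]
  rw [dropTiles N k (by omega), lenTile]
  have h0 : k * N - k * (N + 1) = 0 := by omega
  rw [h0, List.drop_zero, List.take_append, List.take_replicate, List.length_replicate]
  have hmin : min N k = k := by omega
  rw [hmin]
  have hsub : N - k = (N - k - 1) + 1 := by omega
  rw [hsub, Nat.add_comm (N - k - 1) 1, List.replicate_add, List.flatten_append, List.replicate_one, List.flatten_cons,
    List.flatten_nil, List.append_nil, List.cons_append, Nat.add_comm 1 (N - k - 1), List.take_succ_cons, List.take_append,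
    List.take_replicate, List.length_replicate]
  have h3 : min (N - k - 1) N = N - k - 1 := by omega
  have h4 : N - k - 1 - N = 0 := by omega
  rw [h3, h4, List.take_zero, List.append_nil]
  -- RHS: replicate N 0 with position k set to 1
  have hrep : List.replicate N (0 : Int) = List.replicate k 0 ++ 0 :: List.replicate (N - k - 1) 0 := by
    rw [← List.replicate_succ, ← List.replicate_add]
    congr 1
    omega
  rw [hrep, List.set_append_right _ _ (by simp), List.length_replicate, Nat.sub_self]
  rfl

theorem portB_eq (n : Int) : makeIsolatedGraph_alt n = pvIdent n.toNat := by
  simp only [makeIsolatedGraph_alt, pvIdent, PySem.List.pyRange_one, Int.sub_zero, List.map_map]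
  by_cases hn : n ≤ 0
  · rw [Int.toNat_of_nonpos hn]; rfl
  · have hn' : 0 ≤ n := by omega
    have hN : ((n.toNat : Int)) = n := Int.toNat_of_nonneg hn'
    apply List.map_congr_left
    intro k hk
    rw [List.mem_range] at hk
    simp only [Function.comp_apply]
    have ha : ((0 : Int) + (k : Int)) * n = (((k * n.toNat : Nat)) : Int) := by
      push_cast [hN]; ring
    have hb : ((0 : Int) + (k : Int) + 1) * n = ((((k + 1) * n.toNat : Nat)) : Int) := by
      push_cast [hN]; ring
    rw [ha, hb, PySem.List.slice_natCast]
    have hsub : (k + 1) * n.toNat - k * n.toNat = n.toNat := by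
      simp [Nat.succ_mul]
    rw [hsub]
    exact rowB n.toNat k hk

-- ===== VERDICT (by name: the statement is the Claim_ definition above) =====
theorem makeIsolatedGraph_spec : Claim_equal_makeIsolatedGraph := by
  intro n _
  unfold Spec_makeIsolatedGraph
  rw [portA_eq, portB_eq]
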